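-- pv_equiv track=rewrite | github.com/cda2/BJ | python/src/bj1389.py | solution
-- ===== SOURCE A (Python) =====
-- from collections import defaultdict, deque
--
-- def solution(user_n: int, r_list: list):
--     relations: defaultdict = defaultdict(set)
--     for a, b in r_list:
--         relations[a].add(b)
--         relations[b].add(a)
--     result: list = [(i, bfs(start=i, relation=relations)) for i in
--                     range(1, user_n + 1)]
--     return min(result, key=lambda x: x[1])[0]
--
-- def bfs(start: int, relation: defaultdict) -> int:
--     visited: defaultdict = defaultdict(bool)
--     visited[start] = True
--     q: deque = deque()
--     q.append((start, 0))
--     result: int = 0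
--     while len(q) > 0:
--         cur_pos, count = q.popleft()
--         result += count
--         for next_pos in relation[cur_pos]:
--             if not visited[next_pos]:
--                 visited[next_pos] = True
--                 q.append((next_pos, count + 1))
--     return result
-- ===== SOURCE B (Python) =====
-- def solution(user_n: int, r_list: list):
--     # Bellman-Ford style: repeated relaxation rounds over the raw edge list,
--     # dist kept as a dict of reached nodes only (so sum needs no infinity filter).
--     edges = [(a, b) for a, b in r_list]
--     nodes = set()
--     for a, b in edges:
--         nodes.add(a)
--         nodes.add(b)
--     best_id = 0
--     best_sum = -1
--     for i in range(1, user_n + 1):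
--         dist = {i: 0}
--         for _ in range(len(nodes)):
--             for a, b in edges:
--                 if a in dist and (b not in dist or dist[a] + 1 < dist[b]):
--                     dist[b] = dist[a] + 1
--                 if b in dist and (a not in dist or dist[b] + 1 < dist[a]):
--                     dist[a] = dist[b] + 1
--         total = sum(dist.values())
--         if best_sum < 0 or total < best_sum:
--             best_id, best_sum = i, total
--     return best_id
-- ===== Notes on version B (the rewrite author's own statement) =====
-- stated objective: alternative
-- what changed: Per-source BFS with a FIFO queue, visited flags and a materialised (id, sum) list with min(key) is replaced by per-source Bellman-Ford: repeated relaxation rounds over the raw edge list with a distance dictionary of reached nodes (no queue, no frontier, no adjacency structure), summing the dictionary's values and keeping a running minimum.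
import Mathlib
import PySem

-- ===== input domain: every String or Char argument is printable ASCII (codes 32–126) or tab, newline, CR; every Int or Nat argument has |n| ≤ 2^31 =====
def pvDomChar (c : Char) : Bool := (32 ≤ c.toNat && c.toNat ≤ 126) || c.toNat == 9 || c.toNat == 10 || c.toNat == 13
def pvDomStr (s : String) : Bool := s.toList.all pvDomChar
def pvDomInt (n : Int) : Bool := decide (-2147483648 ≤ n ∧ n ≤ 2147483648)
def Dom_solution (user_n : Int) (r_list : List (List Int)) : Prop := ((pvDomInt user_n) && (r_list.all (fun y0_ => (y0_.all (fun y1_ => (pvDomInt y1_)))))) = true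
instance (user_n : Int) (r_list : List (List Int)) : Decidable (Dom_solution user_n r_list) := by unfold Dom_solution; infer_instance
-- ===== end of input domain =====

-- B replaces A's per-source FIFO-queue BFS (adjacency dict of sets, deque of
-- (node, count) pairs, list of all (id, sum) results, min with key) by per-source
-- Bellman-Ford: repeated relaxation rounds over the raw edge list with a distance
-- dict of reached nodes, summed directly, with a running minimum (alternative
-- algorithm; no speed claim).

-- ===== PORT A =====
-- relations: defaultdict(set); relations[a].add(b) is Dict.modify with default empty set.
-- (A row that is not a 2-list raises ValueError in Python — excluded by Pre_; the port
-- skips it.  defaultdict's read-triggered insertion of empty values is value-unobservable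
-- and not modelled.  Python iterates neighbour SETS in hash order; the port iterates them
-- in first-insertion order — the returned sum of BFS distances does not depend on that order.)
def relA (r_list : List (List Int)) : PySem.Dict Int (PySem.Set Int) :=
  r_list.foldl (fun d row =>
    match row with
    | [a, b] => (d.modify a [] (fun s => PySem.Set.add s b)).modify b [] (fun s => PySem.Set.add s a)
    | _ => d) PySem.Dict.empty

-- the while-loop of bfs: visited is defaultdict(bool) = Dict Int Bool with default false;
-- q is the deque (popleft = head, append = ++ [·]); fuel only makes the loop total
-- (each pop is one fuel unit; the fuel passed by bfsA provably suffices).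
def loopA (rel : PySem.Dict Int (PySem.Set Int)) :
    Nat → PySem.Dict Int Bool → List (Int × Int) → Int → Int
  | _, _, [], res => res
  | 0, _, _ :: _, res => res
  | fuel + 1, vis, (cur, cnt) :: qs, res =>
      let st := (rel.getD cur []).foldl
        (fun (st : PySem.Dict Int Bool × List (Int × Int)) np =>
          if st.1.getD np false then st else (st.1.insert np true, st.2 ++ [(np, cnt + 1)]))
        (vis, qs)
      loopA rel fuel st.1 st.2 (res + cnt)

def bfsA (start : Int) (rel : PySem.Dict Int (PySem.Set Int)) : Int :=
  loopA rel (rel.values.flatten.length + 1) (PySem.Dict.empty.insert start true) [(start, 0)] 0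

def solution (user_n : Int) (r_list : List (List Int)) : Int :=
  let rel := relA r_list
  let results := (PySem.List.pyRange 1 (user_n + 1) 1).map (fun i => (i, bfsA i rel))
  -- min(result, key=lambda x: x[1])[0]; min of [] raises ValueError (excluded by Pre_),
  -- the port returns the .getD default there.
  ((PySem.List.min? results (fun x => x.2)).getD (0, 0)).1

-- ===== PORT B =====
-- edges = [(a, b) for a, b in r_list]; a row that is not a 2-list raises ValueError in
-- Python (excluded by Pre_) — the port skips it, exactly like port A does.
def edgesB (r_list : List (List Int)) : List (Int × Int) :=
  r_list.filterMap (fun row => match row with | [a, b] => some (a, b) | _ => none)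

-- nodes = set(); nodes.add(a); nodes.add(b) for every edge
def nodesOf (edges : List (Int × Int)) : PySem.Set Int :=
  edges.foldl (fun s p => PySem.Set.add (PySem.Set.add s p.1) p.2) PySem.Set.empty

-- one 'if x in dist and (y not in dist or dist[x] + 1 < dist[y]): dist[y] = dist[x] + 1'
def relaxB (d : PySem.Dict Int Int) (a b : Int) : PySem.Dict Int Int :=
  match d.get? a with
  | none => d
  | some da =>
    match d.get? b with
    | none => d.insert b (da + 1)
    | some db => if da + 1 < db then d.insert b (da + 1) else d

-- one 'for a, b in edges:' relaxation pass (both directions, sequentially, as in Python)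
def roundB (edges : List (Int × Int)) (d : PySem.Dict Int Int) : PySem.Dict Int Int :=
  edges.foldl (fun d p => relaxB (relaxB d p.1 p.2) p.2 p.1) d

-- dist = {i: 0}; for _ in range(len(nodes)): one pass  (len(nodes) ≥ 0 is nodes.length)
def distsB (edges : List (Int × Int)) (rounds : Nat) (i : Int) : PySem.Dict Int Int :=
  (List.range rounds).foldl (fun d _ => roundB edges d) (PySem.Dict.empty.insert i 0)

def solution_alt (user_n : Int) (r_list : List (List Int)) : Int :=
  let edges := edgesB r_list
  let nodes := nodesOf edges
  ((PySem.List.pyRange 1 (user_n + 1) 1).foldl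
    (fun (best : Int × Int) i =>
      let total := (distsB edges nodes.length i).values.sum
      if best.2 < 0 || total < best.2 then (i, total) else best)
    (0, -1)).1

-- ===== PRECONDITION & SPEC =====
-- Pre_ excludes exactly the inputs where Python A raises: user_n < 1 (min of an empty
-- list, ValueError) and rows that are not 2-element lists (tuple unpacking, ValueError).
def Pre_solution (user_n : Int) (r_list : List (List Int)) : Prop :=
  1 ≤ user_n ∧ ∀ row ∈ r_list, row.length = 2
instance (user_n : Int) (r_list : List (List Int)) : Decidable (Pre_solution user_n r_list) := by
  unfold Pre_solution; infer_instance

def pvWitness_solution : Int × List (List Int) := (3, [[1, 2], [2, 3]])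

def Spec_solution (user_n : Int) (r_list : List (List Int)) (out : Int) : Prop := out = solution_alt user_n r_list
instance (user_n : Int) (r_list : List (List Int)) (out : Int) : Decidable (Spec_solution user_n r_list out) := by unfold Spec_solution; infer_instance

-- ===== CLAIM (what is proved, stated in full; the proofs are below) =====
def Claim_equal_solution : Prop := ∀ (user_n : Int) (r_list : List (List Int)), Dom_solution user_n r_list → Pre_solution user_n r_list → Spec_solution user_n r_list (solution user_n r_list)

-- ===== LEMMAS AND PROOFS =====

-- ---------------------------------------------------------------------------
-- Stage 1: A's queue BFS equals a level-synchronous BFS (proof-side simulation,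
-- `levelSim`/`bfsSim` are PROOF HELPERS, not part of either port).
-- ---------------------------------------------------------------------------

def levelSim (adj : PySem.Dict Int (PySem.Set Int)) :
    Nat → PySem.Set Int → List Int → Int → Int → Int
  | _, _, [], _, total => total
  | 0, _, _ :: _, _, total => total
  | fuel + 1, vis, u :: fs, d, total =>
      let c := (u :: fs).foldl
        (fun (st : PySem.Set Int × List Int) w =>
          (adj.getD w []).foldl
            (fun (s2 : PySem.Set Int × List Int) v =>
              if PySem.Set.contains s2.1 v then s2 else (PySem.Set.add s2.1 v, s2.2 ++ [v])) st)
        (vis, [])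
      levelSim adj fuel c.1 c.2 (d + 1) (total + d * ((u :: fs).length : Int))

def bfsSim (start : Int) (adj : PySem.Dict Int (PySem.Set Int)) : Int :=
  levelSim adj (adj.values.flatten.length + 1) (PySem.Set.add PySem.Set.empty start) [start] 0 0

def stepD (st : PySem.Dict Int Bool × List Int) (v : Int) : PySem.Dict Int Bool × List Int :=
  if st.1.getD v false then st else (st.1.insert v true, st.2 ++ [v])
def stepS (st : PySem.Set Int × List Int) (v : Int) : PySem.Set Int × List Int :=
  if PySem.Set.contains st.1 v then st else (PySem.Set.add st.1 v, st.2 ++ [v])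

lemma mem_getD_mem_flatten (rel : PySem.Dict Int (PySem.Set Int)) (u x : Int)
    (h : x ∈ rel.getD u []) : x ∈ rel.values.flatten := by
  cases hg : rel.get? u with
  | none => rw [PySem.Dict.getD_of_get?_eq_none rel [] hg] at h; cases h
  | some s =>
      rw [PySem.Dict.getD_of_get?_eq_some rel [] hg] at h
      have hi : (u, s) ∈ rel.items := PySem.Dict.mem_items_of_get?_eq_some rel hg
      have hv : s ∈ rel.values := by
        simp only [PySem.Dict.values]
        exact List.mem_map.mpr ⟨(u, s), hi, rfl⟩
      exact List.mem_flatten.mpr ⟨s, hv, h⟩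

lemma foldl_stepD_append (xs : List Int) : ∀ (vis : PySem.Dict Int Bool) (acc : List Int),
    xs.foldl stepD (vis, acc) =
      ((xs.foldl stepD (vis, [])).1, acc ++ (xs.foldl stepD (vis, [])).2) := by
  induction xs with
  | nil => intro vis acc; simp
  | cons x xs ih =>
      intro vis acc
      simp only [List.foldl_cons, stepD]
      by_cases hv : vis.getD x false
      · simp [hv, ih vis acc]
      · simp only [hv, if_false, Bool.false_eq_true]
        rw [ih (vis.insert x true) (acc ++ [x]), ih (vis.insert x true) ([] ++ [x])]
        simp

lemma foldl_stepS_append (xs : List Int) : ∀ (vis : PySem.Set Int) (acc : List Int),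
    xs.foldl stepS (vis, acc) =
      ((xs.foldl stepS (vis, [])).1, acc ++ (xs.foldl stepS (vis, [])).2) := by
  induction xs with
  | nil => intro vis acc; simp
  | cons x xs ih =>
      intro vis acc
      simp only [List.foldl_cons, stepS]
      by_cases hv : PySem.Set.contains vis x
      · simp only [PySem.Set.contains_iff] at hv
        simp [hv, ih vis acc]
      · simp only [hv, Bool.false_eq_true, if_false]
        rw [ih (PySem.Set.add vis x) (acc ++ [x]), ih (PySem.Set.add vis x) ([] ++ [x])]
        simp

lemma A_inner (xs : List Int) : ∀ (vis : PySem.Dict Int Bool) (q : List (Int × Int)) (k : Int),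
    xs.foldl
        (fun (st : PySem.Dict Int Bool × List (Int × Int)) np =>
          if st.1.getD np false then st else (st.1.insert np true, st.2 ++ [(np, k)]))
        (vis, q) =
      ((xs.foldl stepD (vis, [])).1, q ++ ((xs.foldl stepD (vis, [])).2).map (fun v => (v, k))) := by
  induction xs with
  | nil => intro vis q k; simp
  | cons x xs ih =>
      intro vis q k
      simp only [List.foldl_cons, stepD]
      by_cases hv : vis.getD x false
      · simp [hv, ih vis q k]
      · simp only [hv, if_false, Bool.false_eq_true]
        rw [ih (vis.insert x true) (q ++ [(x, k)]) k,
            foldl_stepD_append xs (vis.insert x true) ([] ++ [x])]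
        simp

def cntU (U : List Int) (vis : PySem.Dict Int Bool) : Nat :=
  (U.filter (fun y => !(vis.getD y false))).length

lemma sync_step (visD : PySem.Dict Int Bool) (visS : PySem.Set Int) (x : Int)
    (h : ∀ y, visD.getD y false = PySem.Set.contains visS y) :
    ∀ y, (visD.insert x true).getD y false = PySem.Set.contains (PySem.Set.add visS x) y := by
  intro y
  by_cases hxy : y = x
  · subst hxy
    rw [PySem.Dict.getD_insert_self]
    simp [pysem]
  · rw [PySem.Dict.getD_insert_of_ne visD true false hxy, h y]
    simp [pysem, hxy]

lemma collect_sync (xs : List Int) : ∀ (visD : PySem.Dict Int Bool) (visS : PySem.Set Int),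
    (∀ x, visD.getD x false = PySem.Set.contains visS x) →
    (xs.foldl stepD (visD, [])).2 = (xs.foldl stepS (visS, [])).2 ∧
      (∀ x, (xs.foldl stepD (visD, [])).1.getD x false =
        PySem.Set.contains (xs.foldl stepS (visS, [])).1 x) := by
  induction xs with
  | nil => intro visD visS h; exact ⟨rfl, h⟩
  | cons x xs ih =>
      intro visD visS h
      simp only [List.foldl_cons, stepD, stepS, h x]
      by_cases hv : PySem.Set.contains visS x
      · simp only [hv, if_true]
        exact ih visD visS h
      · simp only [hv, Bool.false_eq_true, if_false]
        have hs := sync_step visD visS x h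
        obtain ⟨h1, h2⟩ := ih (visD.insert x true) (PySem.Set.add visS x) hs
        constructor
        · rw [foldl_stepD_append xs (visD.insert x true) ([] ++ [x]),
              foldl_stepS_append xs (PySem.Set.add visS x) ([] ++ [x])]
          simp [h1]
        · intro y
          rw [foldl_stepD_append xs (visD.insert x true) ([] ++ [x]),
              foldl_stepS_append xs (PySem.Set.add visS x) ([] ++ [x])]
          exact h2 y

lemma cntU_insert_lt (U : List Int) (vis : PySem.Dict Int Bool) (x : Int)
    (hxU : x ∈ U) (hfresh : vis.getD x false = false) :
    cntU U (vis.insert x true) < cntU U vis := by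
  have himp : ∀ y, (fun y => !((vis.insert x true).getD y false)) y = true →
      (fun y => !(vis.getD y false)) y = true := by
    intro y hy
    simp only [] at hy ⊢
    by_cases hxy : y = x
    · subst hxy; rw [PySem.Dict.getD_insert_self] at hy; simp at hy
    · rwa [PySem.Dict.getD_insert_of_ne vis true false hxy] at hy
  have hsub : (U.filter (fun y => !((vis.insert x true).getD y false))).Sublist
      (U.filter (fun y => !(vis.getD y false))) :=
    List.monotone_filter_right U himp
  have hle := hsub.length_le
  have hne : (U.filter (fun y => !((vis.insert x true).getD y false))) ≠
      (U.filter (fun y => !(vis.getD y false))) := by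
    intro he
    have hx1 : x ∈ U.filter (fun y => !(vis.getD y false)) :=
      List.mem_filter.mpr ⟨hxU, by simp [hfresh]⟩
    rw [← he] at hx1
    have := (List.mem_filter.mp hx1).2
    rw [PySem.Dict.getD_insert_self] at this
    simp at this
  have : (U.filter (fun y => !((vis.insert x true).getD y false))).length ≠
      (U.filter (fun y => !(vis.getD y false))).length := by
    intro hl; exact hne (hsub.eq_of_length hl)
  unfold cntU; omega

lemma collect_cnt (U : List Int) (xs : List Int) : ∀ (vis : PySem.Dict Int Bool) (acc : List Int),
    (∀ x ∈ xs, x ∈ U) →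
    cntU U (xs.foldl stepD (vis, acc)).1 + ((xs.foldl stepD (vis, acc)).2).length ≤
      cntU U vis + acc.length := by
  induction xs with
  | nil => intro vis acc _; simp
  | cons x xs ih =>
      intro vis acc hxs
      simp only [List.foldl_cons, stepD]
      by_cases hv : vis.getD x false
      · simp only [hv, if_true]
        exact ih vis acc (fun y hy => hxs y (List.mem_cons_of_mem _ hy))
      · simp only [hv, Bool.false_eq_true, if_false]
        have h1 := ih (vis.insert x true) (acc ++ [x]) (fun y hy => hxs y (List.mem_cons_of_mem _ hy))
        have h2 := cntU_insert_lt U vis x (hxs x List.mem_cons_self) (by simpa using hv)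
        simp only [List.length_append, List.length_singleton] at h1 ⊢
        omega

def levelCollectD (rel : PySem.Dict Int (PySem.Set Int))
    (st : PySem.Dict Int Bool × List Int) (F : List Int) : PySem.Dict Int Bool × List Int :=
  F.foldl (fun st u => (rel.getD u []).foldl stepD st) st

def levelCollectS (rel : PySem.Dict Int (PySem.Set Int))
    (st : PySem.Set Int × List Int) (F : List Int) : PySem.Set Int × List Int :=
  F.foldl (fun st u => (rel.getD u []).foldl stepS st) st

lemma level_sync (rel : PySem.Dict Int (PySem.Set Int)) (F : List Int) :
    ∀ (visD : PySem.Dict Int Bool) (visS : PySem.Set Int) (acc : List Int),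
    (∀ x, visD.getD x false = PySem.Set.contains visS x) →
    (levelCollectD rel (visD, acc) F).2 = (levelCollectS rel (visS, acc) F).2 ∧
      (∀ x, (levelCollectD rel (visD, acc) F).1.getD x false =
        PySem.Set.contains (levelCollectS rel (visS, acc) F).1 x) := by
  induction F with
  | nil => intro visD visS acc h; exact ⟨rfl, h⟩
  | cons u F ih =>
      intro visD visS acc h
      simp only [levelCollectD, levelCollectS, List.foldl_cons] at *
      obtain ⟨h1, h2⟩ := collect_sync (rel.getD u []) visD visS h
      rw [foldl_stepD_append (rel.getD u []) visD acc,
          foldl_stepS_append (rel.getD u []) visS acc, h1]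
      exact ih _ _ _ h2

lemma level_cnt (rel : PySem.Dict Int (PySem.Set Int)) (F : List Int) :
    ∀ (visD : PySem.Dict Int Bool) (acc : List Int),
    cntU rel.values.flatten (levelCollectD rel (visD, acc) F).1 +
        ((levelCollectD rel (visD, acc) F).2).length ≤
      cntU rel.values.flatten visD + acc.length := by
  induction F with
  | nil => intro visD acc; simp [levelCollectD]
  | cons u F ih =>
      intro visD acc
      simp only [levelCollectD, List.foldl_cons] at *
      have h1 := collect_cnt rel.values.flatten (rel.getD u []) visD acc
        (fun x hx => mem_getD_mem_flatten rel u x hx)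
      have h2 := ih ((rel.getD u []).foldl stepD (visD, acc)).1
        ((rel.getD u []).foldl stepD (visD, acc)).2
      simp only [Prod.mk.eta] at h2
      omega

lemma loopA_nil (rel : PySem.Dict Int (PySem.Set Int)) (f : Nat) (vis : PySem.Dict Int Bool) (res : Int) :
    loopA rel f vis [] res = res := by cases f <;> rfl

lemma levelSim_nil (adj : PySem.Dict Int (PySem.Set Int)) (f : Nat) (vis : PySem.Set Int) (d total : Int) :
    levelSim adj f vis [] d total = total := by cases f <;> rfl

lemma loopA_add (rel : PySem.Dict Int (PySem.Set Int)) (f : Nat) :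
    ∀ (vis : PySem.Dict Int Bool) (q : List (Int × Int)) (res : Int),
    loopA rel f vis q res = res + loopA rel f vis q 0 := by
  induction f with
  | zero => intro vis q res; cases q <;> simp [loopA]
  | succ f ih =>
      intro vis q res
      cases q with
      | nil => simp [loopA_nil]
      | cons p qs =>
          obtain ⟨cur, cnt⟩ := p
          simp only [loopA]
          rw [ih _ _ (res + cnt), ih _ _ (0 + cnt)]
          ring

lemma levelSim_add (adj : PySem.Dict Int (PySem.Set Int)) (f : Nat) :
    ∀ (vis : PySem.Set Int) (F : List Int) (d total : Int),
    levelSim adj f vis F d total = total + levelSim adj f vis F d 0 := by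
  induction f with
  | zero => intro vis F d total; cases F <;> simp [levelSim]
  | succ f ih =>
      intro vis F d total
      cases F with
      | nil => simp [levelSim_nil]
      | cons u fs =>
          simp only [levelSim]
          rw [ih _ _ _ (total + d * ((u :: fs).length : Int)),
              ih _ _ _ (0 + d * ((u :: fs).length : Int))]
          ring

lemma loopA_level (rel : PySem.Dict Int (PySem.Set Int)) (l1 : List Int) :
    ∀ (fA : Nat) (visD : PySem.Dict Int Bool) (l2 : List Int) (d res : Int),
    l1.length ≤ fA →
    loopA rel fA visD (l1.map (fun x => (x, d)) ++ l2.map (fun x => (x, d + 1))) res =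
      loopA rel (fA - l1.length) (levelCollectD rel (visD, l2) l1).1
        (((levelCollectD rel (visD, l2) l1).2).map (fun x => (x, d + 1)))
        (res + d * (l1.length : Int)) := by
  induction l1 with
  | nil => intro fA visD l2 d res _; simp [levelCollectD]
  | cons x l1 ih =>
      intro fA visD l2 d res h
      cases fA with
      | zero => simp at h
      | succ fA =>
          simp only [List.map_cons, List.cons_append, loopA]
          rw [A_inner (rel.getD x []) visD
            (l1.map (fun x => (x, d)) ++ l2.map (fun x => (x, d + 1))) (d + 1)]
          rw [List.append_assoc, ← List.map_append]
          rw [ih fA _ (l2 ++ ((rel.getD x []).foldl stepD (visD, [])).2) d (res + d)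
            (by simp only [List.length_cons] at h; omega)]
          simp only [levelCollectD, List.foldl_cons]
          rw [foldl_stepD_append (rel.getD x []) visD l2]
          simp only [List.length_cons, Nat.succ_sub_succ]
          congr 1
          push_cast
          ring

lemma bridge (rel : PySem.Dict Int (PySem.Set Int)) (n : Nat) :
    ∀ (fA fB : Nat) (visD : PySem.Dict Int Bool) (visS : PySem.Set Int) (F : List Int) (d : Int),
    (∀ x, visD.getD x false = PySem.Set.contains visS x) →
    cntU rel.values.flatten visD ≤ n →
    F.length + cntU rel.values.flatten visD ≤ fA →
    1 + cntU rel.values.flatten visD ≤ fB →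
    loopA rel fA visD (F.map (fun x => (x, d))) 0 = levelSim rel fB visS F d 0 := by
  induction n with
  | zero =>
      intro fA fB visD visS F d hsync hn hfA hfB
      cases F with
      | nil => simp only [List.map_nil]; rw [loopA_nil, levelSim_nil]
      | cons u fs =>
          cases fB with
          | zero => omega
          | succ fB =>
              have hlen : (u :: fs).length ≤ fA := by omega
              rw [show (u :: fs).map (fun x => (x, d)) =
                  (u :: fs).map (fun x => (x, d)) ++ ([] : List Int).map (fun x => (x, d + 1)) by simp]
              rw [loopA_level rel (u :: fs) fA visD [] d 0 hlen]
              simp only [levelSim]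
              have hc : (u :: fs).foldl
                  (fun (st : PySem.Set Int × List Int) w =>
                    (rel.getD w []).foldl
                      (fun (s2 : PySem.Set Int × List Int) v =>
                        if PySem.Set.contains s2.1 v then s2
                        else (PySem.Set.add s2.1 v, s2.2 ++ [v])) st)
                  (visS, []) = levelCollectS rel (visS, []) (u :: fs) := rfl
              rw [hc]
              obtain ⟨hL, _⟩ := level_sync rel (u :: fs) visD visS [] hsync
              have hcnt := level_cnt rel (u :: fs) visD []
              have hnil : (levelCollectD rel (visD, []) (u :: fs)).2 = [] := by
                simp only [List.length_nil] at hcnt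
                have := List.length_eq_zero_iff.mp (by omega :
                  ((levelCollectD rel (visD, []) (u :: fs)).2).length = 0)
                exact this
              rw [← hL, hnil]
              simp only [List.map_nil]
              rw [loopA_nil, levelSim_nil]
  | succ n ih =>
      intro fA fB visD visS F d hsync hn hfA hfB
      cases F with
      | nil => simp only [List.map_nil]; rw [loopA_nil, levelSim_nil]
      | cons u fs =>
          cases fB with
          | zero => omega
          | succ fB =>
              have hlen : (u :: fs).length ≤ fA := by omega
              rw [show (u :: fs).map (fun x => (x, d)) =
                  (u :: fs).map (fun x => (x, d)) ++ ([] : List Int).map (fun x => (x, d + 1)) by simp]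
              rw [loopA_level rel (u :: fs) fA visD [] d 0 hlen]
              simp only [levelSim]
              have hc : (u :: fs).foldl
                  (fun (st : PySem.Set Int × List Int) w =>
                    (rel.getD w []).foldl
                      (fun (s2 : PySem.Set Int × List Int) v =>
                        if PySem.Set.contains s2.1 v then s2
                        else (PySem.Set.add s2.1 v, s2.2 ++ [v])) st)
                  (visS, []) = levelCollectS rel (visS, []) (u :: fs) := rfl
              rw [hc]
              obtain ⟨hL, hS⟩ := level_sync rel (u :: fs) visD visS [] hsync
              have hcnt := level_cnt rel (u :: fs) visD []
              simp only [List.length_nil] at hcnt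
              rw [← hL]
              cases hnew : (levelCollectD rel (visD, []) (u :: fs)).2 with
              | nil =>
                  simp only [List.map_nil]
                  rw [loopA_nil, levelSim_nil]
              | cons y ys =>
                  rw [loopA_add, levelSim_add]
                  congr 1
                  have hlen2 : 1 ≤ ((levelCollectD rel (visD, []) (u :: fs)).2).length := by
                    rw [hnew]; simp
                  rw [← hnew]
                  exact ih (fA - (u :: fs).length) fB
                    (levelCollectD rel (visD, []) (u :: fs)).1
                    (levelCollectS rel (visS, []) (u :: fs)).1
                    (levelCollectD rel (visD, []) (u :: fs)).2 (d + 1)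
                    hS (by omega) (by omega) (by omega)

lemma bfs_eq_sim (start : Int) (rel : PySem.Dict Int (PySem.Set Int)) :
    bfsA start rel = bfsSim start rel := by
  unfold bfsA bfsSim
  have hsync : ∀ x, (PySem.Dict.empty.insert start true).getD x false =
      PySem.Set.contains (PySem.Set.add PySem.Set.empty start) x := by
    intro x
    by_cases hx : x = start
    · subst hx; rw [PySem.Dict.getD_insert_self]; simp [pysem]
    · rw [PySem.Dict.getD_insert_of_ne _ true false hx, PySem.Dict.getD_empty]
      simp [pysem, hx]
  have hcle : cntU rel.values.flatten (PySem.Dict.empty.insert start true) ≤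
      rel.values.flatten.length := List.length_filter_le _ _
  have h := bridge rel (cntU rel.values.flatten (PySem.Dict.empty.insert start true))
    (rel.values.flatten.length + 1) (rel.values.flatten.length + 1)
    (PySem.Dict.empty.insert start true) (PySem.Set.add PySem.Set.empty start)
    [start] 0 hsync le_rfl (by simp only [List.length_singleton]; omega) (by omega)
  simpa using h

-- ---------------------------------------------------------------------------
-- Stage 2: distance theory of the (symmetric closure of the) edge list:
-- balls, spheres, minimal distance, stabilization.
-- ---------------------------------------------------------------------------

def Epred (edges : List (Int × Int)) (u v : Int) : Prop := (u, v) ∈ edges ∨ (v, u) ∈ edges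

def expStep (S T : Finset Int) (p : Int × Int) : Finset Int :=
  let T1 := if p.1 ∈ S then insert p.2 T else T
  if p.2 ∈ S then insert p.1 T1 else T1

def expand (edges : List (Int × Int)) (S : Finset Int) : Finset Int :=
  edges.foldl (expStep S) S

lemma mem_foldl_expStep (S : Finset Int) (l : List (Int × Int)) :
    ∀ (T : Finset Int) (v : Int),
    v ∈ l.foldl (expStep S) T ↔
      v ∈ T ∨ ∃ p ∈ l, (p.1 ∈ S ∧ v = p.2) ∨ (p.2 ∈ S ∧ v = p.1) := by
  induction l with
  | nil => intro T v; simp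
  | cons p l ih =>
      intro T v
      simp only [List.foldl_cons, ih, expStep]
      constructor
      · rintro (hT | ⟨q, hq, hcase⟩)
        · by_cases h1 : p.1 ∈ S <;> by_cases h2 : p.2 ∈ S <;>
            simp only [h1, h2, if_true, if_false, Finset.mem_insert] at hT
          · rcases hT with rfl | rfl | hT
            · exact Or.inr ⟨p, List.mem_cons_self, Or.inr ⟨h2, rfl⟩⟩
            · exact Or.inr ⟨p, List.mem_cons_self, Or.inl ⟨h1, rfl⟩⟩
            · exact Or.inl hT
          · rcases hT with rfl | hT
            · exact Or.inr ⟨p, List.mem_cons_self, Or.inl ⟨h1, rfl⟩⟩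
            · exact Or.inl hT
          · rcases hT with rfl | hT
            · exact Or.inr ⟨p, List.mem_cons_self, Or.inr ⟨h2, rfl⟩⟩
            · exact Or.inl hT
          · exact Or.inl hT
        · exact Or.inr ⟨q, List.mem_cons_of_mem _ hq, hcase⟩
      · rintro (hT | ⟨q, hq, hcase⟩)
        · left
          by_cases h1 : p.1 ∈ S <;> by_cases h2 : p.2 ∈ S <;>
            simp [h1, h2, Finset.mem_insert, hT]
        · rcases List.mem_cons.mp hq with heq | hq'
          · rw [heq] at hcase
            left
            rcases hcase with ⟨h1, rfl⟩ | ⟨h2, rfl⟩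
            · by_cases h2 : p.2 ∈ S <;> simp [h1, h2]
            · by_cases h1 : p.1 ∈ S <;> simp [h1, h2]
          · exact Or.inr ⟨q, hq', hcase⟩

lemma mem_expand (edges : List (Int × Int)) (S : Finset Int) (v : Int) :
    v ∈ expand edges S ↔ v ∈ S ∨ ∃ u ∈ S, Epred edges u v := by
  unfold expand
  rw [mem_foldl_expStep]
  constructor
  · rintro (h | ⟨p, hp, ⟨h1, rfl⟩ | ⟨h2, rfl⟩⟩)
    · exact Or.inl h
    · exact Or.inr ⟨p.1, h1, Or.inl (by simpa using hp)⟩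
    · exact Or.inr ⟨p.2, h2, Or.inr (by simpa using hp)⟩
  · rintro (h | ⟨u, hu, he | he⟩)
    · exact Or.inl h
    · exact Or.inr ⟨(u, v), he, Or.inl ⟨hu, rfl⟩⟩
    · exact Or.inr ⟨(v, u), he, Or.inr ⟨hu, rfl⟩⟩

def ball (edges : List (Int × Int)) (s : Int) : Nat → Finset Int
  | 0 => {s}
  | k + 1 => expand edges (ball edges s k)

lemma subset_expand (edges : List (Int × Int)) (S : Finset Int) : S ⊆ expand edges S :=
  fun v hv => (mem_expand edges S v).mpr (Or.inl hv)

lemma ball_mono_succ (edges : List (Int × Int)) (s : Int) (k : Nat) :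
    ball edges s k ⊆ ball edges s (k + 1) := subset_expand edges _

lemma ball_mono (edges : List (Int × Int)) (s : Int) {k l : Nat} (h : k ≤ l) :
    ball edges s k ⊆ ball edges s l := by
  induction l with
  | zero => simp_all
  | succ l ih =>
      rcases Nat.lt_or_ge k (l + 1) with h' | h'
      · exact (ih (by omega)).trans (ball_mono_succ edges s l)
      · have : k = l + 1 := by omega
        subst this; exact subset_rfl

lemma stab_forward (edges : List (Int × Int)) (s : Int) {j : Nat}
    (h : ball edges s (j + 1) = ball edges s j) :
    ∀ m, ball edges s (j + m) = ball edges s j := by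
  intro m
  induction m with
  | zero => rfl
  | succ m ih =>
      have : ball edges s (j + (m + 1)) = expand edges (ball edges s (j + m)) := rfl
      rw [this, ih]
      exact h

def endpointsL (edges : List (Int × Int)) : List Int := edges.flatMap (fun p => [p.1, p.2])

def uniF (edges : List (Int × Int)) (s : Int) : Finset Int :=
  insert s (endpointsL edges).toFinset

lemma ball_subset_uniF (edges : List (Int × Int)) (s : Int) :
    ∀ k, ball edges s k ⊆ uniF edges s := by
  intro k
  induction k with
  | zero =>
      intro v hv
      simp only [ball, Finset.mem_singleton] at hv
      simp [uniF, hv]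
  | succ k ih =>
      intro v hv
      rcases (mem_expand edges _ v).mp hv with h | ⟨u, _, he⟩
      · exact ih h
      · have : v ∈ endpointsL edges := by
          rcases he with h | h
          · exact List.mem_flatMap.mpr ⟨(u, v), h, by simp⟩
          · exact List.mem_flatMap.mpr ⟨(v, u), h, by simp⟩
        simp [uniF, List.mem_toFinset, this]

lemma ball_le_R (edges : List (Int × Int)) (s : Int) {R : Nat}
    (hR : (uniF edges s).card ≤ R + 1) :
    ∀ k, ball edges s k ⊆ ball edges s R := by
  by_cases hstab : ∃ j, j < R ∧ ball edges s (j + 1) = ball edges s j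
  · obtain ⟨j, hjR, hj⟩ := hstab
    intro k
    rcases Nat.lt_or_ge R k with hk | hk
    swap
    · exact ball_mono edges s hk
    · have h1 : ball edges s k = ball edges s j := by
        have := stab_forward edges s hj (k - j)
        rwa [Nat.add_sub_cancel' (by omega)] at this
      rw [h1]
      exact ball_mono edges s (by omega)
  · push_neg at hstab
    have grow : ∀ j, j ≤ R → j + 1 ≤ (ball edges s j).card := by
      intro j
      induction j with
      | zero =>
          intro _
          simp [ball]
      | succ j ih =>
          intro hjR
          have hne := hstab j (by omega)
          have hss : ball edges s j ⊂ ball edges s (j + 1) :=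
            lt_of_le_of_ne (ball_mono_succ edges s j) (fun h => hne h.symm)
          have := Finset.card_lt_card hss
          have := ih (by omega)
          omega
    have hcard : R + 1 ≤ (ball edges s R).card := grow R le_rfl
    have hfull : ball edges s R = uniF edges s :=
      Finset.eq_of_subset_of_card_le (ball_subset_uniF edges s R) (by omega)
    intro k
    rw [hfull]
    exact ball_subset_uniF edges s k

def sph (edges : List (Int × Int)) (s : Int) : Nat → Finset Int
  | 0 => ball edges s 0
  | k + 1 => ball edges s (k + 1) \ ball edges s k

lemma sph_subset_ball (edges : List (Int × Int)) (s : Int) (k : Nat) :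
    sph edges s k ⊆ ball edges s k := by
  cases k with
  | zero => exact subset_rfl
  | succ k => exact Finset.sdiff_subset

def dminEx (edges : List (Int × Int)) (s : Int) (R : Nat) (v : Int) :
    ∃ k, v ∈ ball edges s k ∨ k = R + 1 := ⟨R + 1, Or.inr rfl⟩

def dmin (edges : List (Int × Int)) (s : Int) (R : Nat) (v : Int) : Nat :=
  Nat.find (dminEx edges s R v)

lemma dmin_le (edges : List (Int × Int)) (s : Int) (R : Nat) {v : Int} {k : Nat}
    (hv : v ∈ ball edges s k) : dmin edges s R v ≤ k := by
  unfold dmin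
  exact Nat.find_le (Or.inl hv)

lemma dmin_spec_or (edges : List (Int × Int)) (s : Int) (R : Nat) (v : Int) :
    v ∈ ball edges s (dmin edges s R v) ∨ dmin edges s R v = R + 1 := by
  unfold dmin
  exact Nat.find_spec (dminEx edges s R v)

lemma dmin_mem (edges : List (Int × Int)) (s : Int) (R : Nat) {v : Int}
    (hv : v ∈ ball edges s R) :
    v ∈ ball edges s (dmin edges s R v) ∧ dmin edges s R v ≤ R := by
  have hle : dmin edges s R v ≤ R := dmin_le edges s R hv
  rcases dmin_spec_or edges s R v with h | h
  · exact ⟨h, hle⟩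
  · omega

lemma dmin_sphere (edges : List (Int × Int)) (s : Int) (R : Nat) {v : Int} {g : Nat}
    (hg : g ≤ R) (hv : v ∈ sph edges s g) : dmin edges s R v = g := by
  cases g with
  | zero =>
      have : v ∈ ball edges s 0 := hv
      have := dmin_le edges s R this
      omega
  | succ g =>
      simp only [sph, Finset.mem_sdiff] at hv
      have hle := dmin_le edges s R hv.1
      rcases Nat.lt_or_ge (dmin edges s R v) (g + 1) with h | h
      · exfalso
        have hmem : v ∈ ball edges s (dmin edges s R v) := by
          rcases dmin_spec_or edges s R v with h' | h'
          · exact h'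
          · omega
        exact hv.2 (ball_mono edges s (by omega) hmem)
      · omega

def totalSpec (edges : List (Int × Int)) (s : Int) (R : Nat) : Int :=
  ∑ v ∈ ball edges s R, (dmin edges s R v : Int)

lemma sphere_empty_ball_eq (edges : List (Int × Int)) (s : Int) {R g : Nat}
    (hR : (uniF edges s).card ≤ R + 1) (hsph : sph edges s g = ∅) :
    ball edges s g = ball edges s R := by
  cases g with
  | zero =>
      exfalso
      have : s ∈ sph edges s 0 := by simp [sph, ball]
      rw [hsph] at this
      simp at this
  | succ g =>
      have hsub : ball edges s (g + 1) ⊆ ball edges s g := by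
        intro x hx
        by_contra hx2
        have : x ∈ sph edges s (g + 1) := Finset.mem_sdiff.mpr ⟨hx, hx2⟩
        rw [hsph] at this
        simp at this
      have heq : ball edges s (g + 1) = ball edges s g :=
        Finset.Subset.antisymm hsub (ball_mono_succ edges s g)
      apply Finset.Subset.antisymm
      · exact ball_le_R edges s hR (g + 1)
      · rcases Nat.lt_or_ge (g + 1) R with h | h
        swap
        · exact ball_mono edges s h
        · have := stab_forward edges s heq (R - g)
          rw [Nat.add_sub_cancel' (by omega)] at this
          rw [this, heq]

-- ---------------------------------------------------------------------------
-- Stage 3: the level-synchronous BFS computes totalSpec.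
-- ---------------------------------------------------------------------------

lemma collect_pair (xs : List Int) : ∀ (vis : PySem.Set Int) (acc : List Int),
    xs.foldl stepS (vis, acc) =
      (PySem.Set.update vis xs, acc ++ (PySem.Set.update vis xs).drop vis.length) := by
  induction xs with
  | nil =>
      intro vis acc
      have h1 : PySem.Set.update vis [] = vis := rfl
      simp [h1, List.drop_length]
  | cons x xs ih =>
      intro vis acc
      have hupd : PySem.Set.update vis (x :: xs) = PySem.Set.update (PySem.Set.add vis x) xs := rfl
      simp only [List.foldl_cons, stepS]
      by_cases hv : PySem.Set.contains vis x
      · have hadd : PySem.Set.add vis x = vis := by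
          unfold PySem.Set.add; rw [if_pos hv]
        rw [if_pos hv, ih vis acc, hupd, hadd]
      · have hadd : PySem.Set.add vis x = vis ++ [x] := by
          unfold PySem.Set.add; rw [if_neg hv]
        rw [if_neg hv, ih (PySem.Set.add vis x) (acc ++ [x]), hupd]
        have hr : PySem.Set.update (PySem.Set.add vis x) xs = (vis ++ [x]) ++
            List.filter (fun y => !(PySem.Set.contains (PySem.Set.add vis x) y))
              (PySem.Set.ofList xs) := by
          rw [← hadd]
          exact PySem.Set.update_eq_append_filter _ _
        set r := List.filter (fun y => !(PySem.Set.contains (PySem.Set.add vis x) y))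
          (PySem.Set.ofList xs) with hrdef
        rw [hr, hadd]
        rw [Prod.mk.injEq]
        refine ⟨rfl, ?_⟩
        have hd1 : ((vis ++ [x]) ++ r).drop (vis ++ [x]).length = r := List.drop_left
        have hd2 : ((vis ++ [x]) ++ r).drop vis.length = x :: r := by
          rw [List.append_assoc]
          exact List.drop_left
        rw [hd1, hd2]
        simp

lemma chainS (rel : PySem.Dict Int (PySem.Set Int)) (F : List Int) :
    ∀ (st : PySem.Set Int × List Int),
    levelCollectS rel st F = (F.flatMap (fun u => rel.getD u [])).foldl stepS st := by
  induction F with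
  | nil => intro st; rfl
  | cons u F ih =>
      intro st
      simp only [levelCollectS, List.foldl_cons, List.flatMap_cons, List.foldl_append]
      exact ih _

lemma levelSim_total (rel : PySem.Dict Int (PySem.Set Int)) (edges : List (Int × Int)) (s : Int)
    (R : Nat)
    (hadj : ∀ u v : Int, v ∈ rel.getD u [] ↔ Epred edges u v)
    (hR : (uniF edges s).card ≤ R + 1) :
    ∀ (fuel g : Nat) (vis frontier : List Int) (total : Int),
    vis.Nodup → vis.toFinset = ball edges s g →
    frontier.Nodup → frontier.toFinset = sph edges s g →
    (uniF edges s).card + 1 ≤ fuel + (ball edges s g).card →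
    total = ∑ v ∈ ball edges s g \ sph edges s g, (dmin edges s R v : Int) →
    levelSim rel fuel vis frontier (g : Int) total = totalSpec edges s R := by
  intro fuel
  induction fuel with
  | zero =>
      intro g vis frontier total hvnd hvfin hfnd hffin hfuel htot
      cases frontier with
      | cons u fs =>
          exfalso
          have h1 : (ball edges s g).card ≤ (uniF edges s).card :=
            Finset.card_le_card (ball_subset_uniF edges s g)
          omega
      | nil =>
          rw [levelSim_nil]
          have hsph : sph edges s g = ∅ := by rw [← hffin]; simp
          have hball : ball edges s g = ball edges s R :=
            sphere_empty_ball_eq edges s hR hsph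
          rw [htot, hsph, Finset.sdiff_empty, hball]
          rfl
  | succ fuel ih =>
      intro g vis frontier total hvnd hvfin hfnd hffin hfuel htot
      cases frontier with
      | nil =>
          rw [levelSim_nil]
          have hsph : sph edges s g = ∅ := by rw [← hffin]; simp
          have hball : ball edges s g = ball edges s R :=
            sphere_empty_ball_eq edges s hR hsph
          rw [htot, hsph, Finset.sdiff_empty, hball]
          rfl
      | cons u fs =>
          -- the nonempty frontier forces g ≤ R
          have hgfacts : u ∈ sph edges s g := by
            rw [← hffin]; simp
          have hgR : g ≤ R := by
            by_contra hgt
            push_neg at hgt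
            cases g with
            | zero => omega
            | succ g' =>
                have h1 : u ∈ ball edges s (g' + 1) ∧ u ∉ ball edges s g' := by
                  simpa [sph, Finset.mem_sdiff] using hgfacts
                have h2 : u ∈ ball edges s R := ball_le_R edges s hR _ h1.1
                exact h1.2 (ball_mono edges s (by omega) h2)
          -- unfold one step
          simp only [levelSim]
          have hc : (u :: fs).foldl
              (fun (st : PySem.Set Int × List Int) w =>
                (rel.getD w []).foldl
                  (fun (s2 : PySem.Set Int × List Int) v =>
                    if PySem.Set.contains s2.1 v then s2
                    else (PySem.Set.add s2.1 v, s2.2 ++ [v])) st)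
              (vis, []) = levelCollectS rel (vis, []) (u :: fs) := rfl
          rw [hc, chainS]
          set X := (u :: fs).flatMap (fun w => rel.getD w []) with hX
          rw [collect_pair X vis []]
          set nv := PySem.Set.update vis X with hnv
          set nf := nv.drop vis.length with hnf
          simp only [List.nil_append]
          -- structural facts
          have hsplit : nv = vis ++ nf := by
            rw [hnf, hnv, PySem.Set.update_eq_append_filter]
            rw [List.drop_left]
          have hnvnd : nv.Nodup := PySem.Set.nodup_update vis X hvnd
          have hnfnd : nf.Nodup := by
            rw [hsplit] at hnvnd
            exact (List.nodup_append.mp hnvnd).2.1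
          have hdisj : ∀ x ∈ nf, x ∉ vis := by
            rw [hsplit] at hnvnd
            intro x hx hx2
            exact List.disjoint_of_nodup_append hnvnd hx2 hx
          have hmem_nv : ∀ x, x ∈ nv ↔ x ∈ vis ∨ x ∈ X := fun x => PySem.Set.mem_update vis X x
          have hmem_nf : ∀ x, x ∈ nf ↔ x ∈ nv ∧ x ∉ vis := by
            intro x
            constructor
            · intro hx
              exact ⟨by rw [hsplit]; exact List.mem_append_right _ hx, hdisj x hx⟩
            · rintro ⟨hx, hx2⟩
              rw [hsplit] at hx
              rcases List.mem_append.mp hx with h | h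
              · exact absurd h hx2
              · exact h
          have hmem_X : ∀ x, x ∈ X ↔ ∃ w, w ∈ sph edges s g ∧ Epred edges w x := by
            intro x
            rw [hX, List.mem_flatMap]
            constructor
            · rintro ⟨w, hw, hx⟩
              refine ⟨w, ?_, (hadj w x).mp hx⟩
              rw [← hffin]
              simpa using hw
            · rintro ⟨w, hw, he⟩
              refine ⟨w, ?_, (hadj w x).mpr he⟩
              rw [← hffin] at hw
              simpa using hw
          -- new visited = ball (g+1)
          have hball_succ : ∀ x, x ∈ ball edges s (g + 1) ↔
              x ∈ ball edges s g ∨ ∃ w ∈ ball edges s g, Epred edges w x := by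
            intro x
            exact mem_expand edges (ball edges s g) x
          have hnv_fin : nv.toFinset = ball edges s (g + 1) := by
            apply Finset.ext
            intro x
            rw [List.mem_toFinset, hmem_nv x, hmem_X x, hball_succ x]
            constructor
            · rintro (hx | ⟨w, hw, he⟩)
              · exact Or.inl (by rw [← hvfin]; simpa using hx)
              · exact Or.inr ⟨w, sph_subset_ball edges s g hw, he⟩
            · rintro (hx | ⟨w, hw, he⟩)
              · left; rw [← hvfin] at hx; simpa using hx
              · by_cases hxb : x ∈ ball edges s g
                · left; rw [← hvfin] at hxb; simpa using hxb
                · right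
                  refine ⟨w, ?_, he⟩
                  cases g with
                  | zero => exact hw
                  | succ g' =>
                      simp only [sph, Finset.mem_sdiff]
                      refine ⟨hw, fun hwb => hxb ?_⟩
                      exact (mem_expand edges (ball edges s g') x).mpr (Or.inr ⟨w, hwb, he⟩)
          have hnf_fin : nf.toFinset = sph edges s (g + 1) := by
            apply Finset.ext
            intro x
            rw [List.mem_toFinset, hmem_nf x]
            simp only [sph, Finset.mem_sdiff]
            rw [← hnv_fin, ← hvfin, List.mem_toFinset, List.mem_toFinset]
          -- the new total
          have hcard_sph : ((u :: fs).length : Int) = ((sph edges s g).card : Int) := by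
            rw [← hffin, List.toFinset_card_of_nodup hfnd]
          have hsum_sph : ∑ v ∈ sph edges s g, (dmin edges s R v : Int) =
              (g : Int) * ((sph edges s g).card : Int) := by
            rw [Finset.sum_congr rfl (fun v hv => by
              rw [dmin_sphere edges s R hgR hv])]
            simp [Finset.sum_const, mul_comm]
          have htot' : total + (g : Int) * ((u :: fs).length : Int) =
              ∑ v ∈ ball edges s g, (dmin edges s R v : Int) := by
            rw [htot, hcard_sph]
            rw [← Finset.sum_sdiff (sph_subset_ball edges s g)
              (f := fun v => (dmin edges s R v : Int)), hsum_sph]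
          -- split on whether the new frontier is empty
          cases hnfc : nf with
          | nil =>
              rw [levelSim_nil]
              have hsph1 : sph edges s (g + 1) = ∅ := by
                rw [← hnf_fin, hnfc]; simp
              have heq1 : ball edges s (g + 1) = ball edges s g := by
                apply Finset.Subset.antisymm
                · intro x hx
                  by_contra hx2
                  have : x ∈ sph edges s (g + 1) := Finset.mem_sdiff.mpr ⟨hx, hx2⟩
                  rw [hsph1] at this
                  simp at this
                · exact ball_mono_succ edges s g
              have hball : ball edges s (g + 1) = ball edges s R :=
                sphere_empty_ball_eq edges s hR hsph1
              rw [htot']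
              rw [← heq1, hball]
              rfl
          | cons y ys =>
              rw [← hnfc]
              have hcast : (g : Int) + 1 = ((g + 1 : Nat) : Int) := by push_cast; ring
              rw [hcast]
              apply ih (g + 1) nv nf _ hnvnd hnv_fin hnfnd hnf_fin
              · -- fuel
                have hcardsucc : (ball edges s (g + 1)).card =
                    (ball edges s g).card + (sph edges s (g + 1)).card := by
                  have := Finset.card_sdiff_add_card_eq_card (ball_mono_succ edges s g)
                  simp only [sph]
                  omega
                have hpos : 1 ≤ (sph edges s (g + 1)).card := by
                  have : y ∈ sph edges s (g + 1) := by
                    rw [← hnf_fin, hnfc]; simp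
                  exact Finset.card_pos.mpr ⟨y, this⟩ 
                omega
              · -- total
                have hsd : ball edges s (g + 1) \ sph edges s (g + 1) = ball edges s g := by
                  apply Finset.ext
                  intro x
                  simp only [sph, Finset.mem_sdiff]
                  constructor
                  · rintro ⟨hx1, hx2⟩
                    by_contra hxg
                    exact hx2 ⟨hx1, hxg⟩
                  · intro hx
                    exact ⟨ball_mono_succ edges s g hx, fun h => h.2 hx⟩
                rw [htot', hsd]

-- ---------------------------------------------------------------------------
-- Stage 4: adjacency characterisation of A's relation dict, and the node set.
-- ---------------------------------------------------------------------------

lemma Epred_cons (a b u v : Int) (l : List (Int × Int)) :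
    Epred ((a, b) :: l) u v ↔ (u = a ∧ v = b) ∨ (u = b ∧ v = a) ∨ Epred l u v := by
  unfold Epred
  simp only [List.mem_cons, Prod.mk.injEq]
  tauto

lemma mem_modify2 (d : PySem.Dict Int (PySem.Set Int)) (a b u v : Int) :
    v ∈ ((d.modify a [] (fun s => PySem.Set.add s b)).modify b []
        (fun s => PySem.Set.add s a)).getD u [] ↔
      v ∈ d.getD u [] ∨ (u = a ∧ v = b) ∨ (u = b ∧ v = a) := by
  by_cases hub : u = b
  · subst hub
    rw [PySem.Dict.getD_modify_self, PySem.Set.mem_add]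
    by_cases hua : u = a
    · subst hua
      rw [PySem.Dict.getD_modify_self, PySem.Set.mem_add]
      constructor
      · rintro ((h | rfl) | rfl)
        · exact Or.inl h
        · exact Or.inr (Or.inl ⟨rfl, rfl⟩)
        · exact Or.inr (Or.inr ⟨rfl, rfl⟩)
      · rintro (h | ⟨_, rfl⟩ | ⟨_, rfl⟩)
        · exact Or.inl (Or.inl h)
        · exact Or.inl (Or.inr rfl)
        · exact Or.inr rfl
    · rw [PySem.Dict.getD_modify_of_ne d [] _ hua]
      constructor
      · rintro (h | rfl)
        · exact Or.inl h
        · exact Or.inr (Or.inr ⟨rfl, rfl⟩)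
      · rintro (h | ⟨hu, _⟩ | ⟨_, rfl⟩)
        · exact Or.inl h
        · exact absurd hu hua
        · exact Or.inr rfl
  · rw [PySem.Dict.getD_modify_of_ne _ [] _ hub]
    by_cases hua : u = a
    · subst hua
      rw [PySem.Dict.getD_modify_self, PySem.Set.mem_add]
      constructor
      · rintro (h | rfl)
        · exact Or.inl h
        · exact Or.inr (Or.inl ⟨rfl, rfl⟩)
      · rintro (h | ⟨_, rfl⟩ | ⟨hub', _⟩)
        · exact Or.inl h
        · exact Or.inr rfl
        · exact absurd hub' hub
    · rw [PySem.Dict.getD_modify_of_ne d [] _ hua]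
      constructor
      · exact fun h => Or.inl h
      · rintro (h | ⟨hua', _⟩ | ⟨hub', _⟩)
        · exact h
        · exact absurd hua' hua
        · exact absurd hub' hub

lemma mem_relA_aux (r_list : List (List Int)) :
    ∀ (d : PySem.Dict Int (PySem.Set Int)) (u v : Int),
    v ∈ (r_list.foldl (fun d row =>
      match row with
      | [a, b] => (d.modify a [] (fun s => PySem.Set.add s b)).modify b [] (fun s => PySem.Set.add s a)
      | _ => d) d).getD u [] ↔
    v ∈ d.getD u [] ∨ Epred (edgesB r_list) u v := by
  induction r_list with
  | nil =>
      intro d u v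
      simp [edgesB, Epred]
  | cons row rows ih =>
      intro d u v
      match row with
      | [a, b] =>
          simp only [List.foldl_cons]
          rw [ih]
          have hedges : edgesB ([a, b] :: rows) = (a, b) :: edgesB rows := by
            simp [edgesB]
          rw [hedges, Epred_cons, mem_modify2]
          tauto
      | [] =>
          simp only [List.foldl_cons]
          rw [ih]
          have h : edgesB ([] :: rows) = edgesB rows := by simp [edgesB]
          rw [h]
      | [a] =>
          simp only [List.foldl_cons]
          rw [ih]
          have h : edgesB ([a] :: rows) = edgesB rows := by simp [edgesB]
          rw [h]
      | a :: b :: c :: t =>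
          simp only [List.foldl_cons]
          rw [ih]
          have h : edgesB ((a :: b :: c :: t) :: rows) = edgesB rows := by simp [edgesB]
          rw [h]

lemma mem_relA (r_list : List (List Int)) (u v : Int) :
    v ∈ (relA r_list).getD u [] ↔ Epred (edgesB r_list) u v := by
  unfold relA
  rw [mem_relA_aux]
  simp [PySem.Dict.getD_empty]

lemma nodesOf_eq_ofList (edges : List (Int × Int)) :
    nodesOf edges = PySem.Set.ofList (endpointsL edges) := by
  rw [PySem.Set.ofList_eq_foldl]
  unfold nodesOf endpointsL
  have key : ∀ (l : List (Int × Int)) (s0 : PySem.Set Int),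
      l.foldl (fun s p => PySem.Set.add (PySem.Set.add s p.1) p.2) s0 =
      (l.flatMap (fun p => [p.1, p.2])).foldl PySem.Set.add s0 := by
    intro l
    induction l with
    | nil => intro s0; rfl
    | cons p l ih =>
        intro s0
        simp only [List.foldl_cons, List.flatMap_cons, List.foldl_append]
        exact ih _
  exact key _ _

lemma mem_nodesOf (edges : List (Int × Int)) (x : Int) :
    x ∈ nodesOf edges ↔ x ∈ endpointsL edges := by
  rw [nodesOf_eq_ofList]
  exact PySem.Set.mem_ofList _ _

lemma nodup_nodesOf (edges : List (Int × Int)) : (nodesOf edges).Nodup := by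
  rw [nodesOf_eq_ofList]
  exact PySem.Set.nodup_ofList _

lemma card_uniF_le (edges : List (Int × Int)) (s : Int) :
    (uniF edges s).card ≤ (nodesOf edges).length + 1 := by
  unfold uniF
  have h1 : (endpointsL edges).toFinset = (nodesOf edges).toFinset := by
    apply Finset.ext
    intro x
    rw [List.mem_toFinset, List.mem_toFinset, mem_nodesOf]
  calc (insert s (endpointsL edges).toFinset).card
      ≤ (endpointsL edges).toFinset.card + 1 := Finset.card_insert_le _ _
    _ = (nodesOf edges).toFinset.card + 1 := by rw [h1]
    _ = (nodesOf edges).length + 1 := by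
        rw [List.toFinset_card_of_nodup (nodup_nodesOf edges)]

-- endpoints all occur in rel.values.flatten (for the fuel bound)
lemma uniF_card_le_flatten (r_list : List (List Int)) (s : Int) :
    (uniF (edgesB r_list) s).card ≤ (relA r_list).values.flatten.length + 1 := by
  unfold uniF
  have hsub : (endpointsL (edgesB r_list)).toFinset ⊆
      ((relA r_list).values.flatten).toFinset := by
    intro x hx
    rw [List.mem_toFinset] at hx ⊢
    rw [endpointsL, List.mem_flatMap] at hx
    obtain ⟨p, hp, hx⟩ := hx
    have hx' : x = p.1 ∨ x = p.2 := by simpa using hx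
    rcases hx' with h | h
    · -- x = p.1 : (x, p.2) = p ∈ edges, so Epred p.2 x holds
      have hmem : x ∈ (relA r_list).getD p.2 [] := by
        apply (mem_relA r_list p.2 x).mpr
        right
        rw [h]
        simpa using hp
      exact mem_getD_mem_flatten _ _ _ hmem
    · have hmem : x ∈ (relA r_list).getD p.1 [] := by
        apply (mem_relA r_list p.1 x).mpr
        left
        rw [h]
        simpa using hp
      exact mem_getD_mem_flatten _ _ _ hmem
  calc (insert s (endpointsL (edgesB r_list)).toFinset).card
      ≤ (endpointsL (edgesB r_list)).toFinset.card + 1 := Finset.card_insert_le _ _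
    _ ≤ ((relA r_list).values.flatten).toFinset.card + 1 := by
        have := Finset.card_le_card hsub
        omega
    _ ≤ (relA r_list).values.flatten.length + 1 := by
        have := List.toFinset_card_le ((relA r_list).values.flatten)
        omega

-- A's per-source BFS sum equals totalSpec
lemma bfsA_eq_totalSpec (r_list : List (List Int)) (i : Int) :
    bfsA i (relA r_list) =
      totalSpec (edgesB r_list) i (nodesOf (edgesB r_list)).length := by
  rw [bfs_eq_sim]
  unfold bfsSim
  set edges := edgesB r_list with hE
  set R := (nodesOf edges).length with hRdef
  have hR : (uniF edges i).card ≤ R + 1 := card_uniF_le edges i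
  have hadj : ∀ u v : Int, v ∈ (relA r_list).getD u [] ↔ Epred edges u v :=
    fun u v => mem_relA r_list u v
  have hstart : PySem.Set.add PySem.Set.empty i = [i] := rfl
  rw [hstart]
  have h0 : ((0 : Nat) : Int) = (0 : Int) := rfl
  rw [← h0]
  apply levelSim_total (relA r_list) edges i R hadj hR
    ((relA r_list).values.flatten.length + 1) 0 [i] [i] 0
  · simp
  · simp [ball]
  · simp
  · simp [sph, ball]
  · have h2 := uniF_card_le_flatten r_list i
    rw [← hE] at h2
    have h1 : (ball edges i 0).card = 1 := by simp [ball]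
    omega
  · rw [show sph edges i 0 = ball edges i 0 from rfl]
    rw [Finset.sdiff_self, Finset.sum_empty]

-- ---------------------------------------------------------------------------
-- Stage 5: Bellman-Ford computes totalSpec.
-- ---------------------------------------------------------------------------

-- domain entries never disappear and never increase
lemma relaxB_none (d : PySem.Dict Int Int) (a b : Int) (h : d.get? a = none) :
    relaxB d a b = d := by
  unfold relaxB; rw [h]

lemma relaxB_some_none (d : PySem.Dict Int Int) (a b : Int) (da : Int)
    (h1 : d.get? a = some da) (h2 : d.get? b = none) :
    relaxB d a b = d.insert b (da + 1) := by
  unfold relaxB; rw [h1, h2]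

lemma relaxB_some_some (d : PySem.Dict Int Int) (a b : Int) (da db : Int)
    (h1 : d.get? a = some da) (h2 : d.get? b = some db) :
    relaxB d a b = if da + 1 < db then d.insert b (da + 1) else d := by
  unfold relaxB; rw [h1, h2]

lemma relaxB_mono (d : PySem.Dict Int Int) (a b v : Int) (c : Int)
    (h : d.get? v = some c) :
    ∃ c' ≤ c, (relaxB d a b).get? v = some c' := by
  cases hga : d.get? a with
  | none => rw [relaxB_none d a b hga]; exact ⟨c, le_rfl, h⟩
  | some da =>
      cases hgb : d.get? b with
      | none =>
          rw [relaxB_some_none d a b da hga hgb]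
          by_cases hvb : v = b
          · subst hvb; rw [h] at hgb; cases hgb
          · refine ⟨c, le_rfl, ?_⟩
            rw [PySem.Dict.get?_insert, if_neg hvb]
            exact h
      | some db =>
          rw [relaxB_some_some d a b da db hga hgb]
          by_cases hlt : da + 1 < db
          · rw [if_pos hlt]
            by_cases hvb : v = b
            · subst hvb
              rw [h] at hgb
              injection hgb with hdb
              refine ⟨da + 1, by omega, ?_⟩
              rw [PySem.Dict.get?_insert, if_pos rfl]
            · refine ⟨c, le_rfl, ?_⟩
              rw [PySem.Dict.get?_insert, if_neg hvb]
              exact h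
          · rw [if_neg hlt]
            exact ⟨c, le_rfl, h⟩

lemma foldl_round_mono (l : List (Int × Int)) :
    ∀ (d : PySem.Dict Int Int) (v : Int) (c : Int),
    d.get? v = some c →
    ∃ c' ≤ c, (l.foldl (fun d p => relaxB (relaxB d p.1 p.2) p.2 p.1) d).get? v = some c' := by
  induction l with
  | nil => intro d v c h; exact ⟨c, le_rfl, h⟩
  | cons p l ih =>
      intro d v c h
      obtain ⟨c1, hc1, h1⟩ := relaxB_mono d p.1 p.2 v c h
      obtain ⟨c2, hc2, h2⟩ := relaxB_mono (relaxB d p.1 p.2) p.2 p.1 v c1 h1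
      obtain ⟨c3, hc3, h3⟩ := ih _ v c2 h2
      exact ⟨c3, by omega, h3⟩

-- one relaxation sends an entry across an edge occurrence
lemma relaxB_sends (d : PySem.Dict Int Int) (a b : Int) (ca : Int)
    (h : d.get? a = some ca) :
    ∃ cb ≤ ca + 1, (relaxB d a b).get? b = some cb := by
  cases hgb : d.get? b with
  | none =>
      rw [relaxB_some_none d a b ca h hgb]
      exact ⟨ca + 1, le_rfl, by rw [PySem.Dict.get?_insert, if_pos rfl]⟩
  | some db =>
      rw [relaxB_some_some d a b ca db h hgb]
      by_cases hlt : ca + 1 < db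
      · rw [if_pos hlt]
        exact ⟨ca + 1, le_rfl, by rw [PySem.Dict.get?_insert, if_pos rfl]⟩
      · rw [if_neg hlt]
        exact ⟨db, by omega, hgb⟩

lemma round_sends (edges : List (Int × Int)) (p : Int × Int) (hp : p ∈ edges)
    (d : PySem.Dict Int Int) :
    (∀ ca, d.get? p.1 = some ca →
      ∃ cb ≤ ca + 1, (roundB edges d).get? p.2 = some cb) ∧
    (∀ cb, d.get? p.2 = some cb →
      ∃ ca ≤ cb + 1, (roundB edges d).get? p.1 = some ca) := by
  obtain ⟨l1, l2, rfl⟩ := List.append_of_mem hp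
  unfold roundB
  rw [List.foldl_append, List.foldl_cons]
  constructor
  · intro ca h
    obtain ⟨ca', hca', h1⟩ := foldl_round_mono l1 d p.1 ca h
    obtain ⟨cb1, hcb1, h2⟩ := relaxB_sends _ p.1 p.2 ca' h1
    obtain ⟨cb2, hcb2, h3⟩ := relaxB_mono (relaxB _ p.1 p.2) p.2 p.1 p.2 cb1 h2
    obtain ⟨cb3, hcb3, h4⟩ := foldl_round_mono l2 _ p.2 cb2 h3
    exact ⟨cb3, by omega, h4⟩
  · intro cb h
    obtain ⟨cb', hcb', h1⟩ := foldl_round_mono l1 d p.2 cb h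
    obtain ⟨cb'', hcb'', h2⟩ := relaxB_mono _ p.1 p.2 p.2 cb' h1
    obtain ⟨ca1, hca1, h3⟩ := relaxB_sends (relaxB _ p.1 p.2) p.2 p.1 cb'' h2
    obtain ⟨ca2, hca2, h4⟩ := foldl_round_mono l2 _ p.1 ca1 h3
    exact ⟨ca2, by omega, h4⟩

-- validity: every entry is a correct upper bound witnessed by a ball
def ValidD (edges : List (Int × Int)) (s : Int) (d : PySem.Dict Int Int) : Prop :=
  ∀ v c, d.get? v = some c → ∃ k : Nat, c = (k : Int) ∧ v ∈ ball edges s k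

lemma valid_relaxB (edges : List (Int × Int)) (s : Int) (d : PySem.Dict Int Int)
    (a b : Int) (hab : Epred edges a b) (hd : ValidD edges s d) :
    ValidD edges s (relaxB d a b) := by
  intro v c hv
  cases hga : d.get? a with
  | none => rw [relaxB_none d a b hga] at hv; exact hd v c hv
  | some da =>
      obtain ⟨ka, hka, hball⟩ := hd a da hga
      have hnext : b ∈ ball edges s (ka + 1) :=
        (mem_expand edges (ball edges s ka) b).mpr (Or.inr ⟨a, hball, hab⟩)
      cases hgb : d.get? b with
      | none =>
          rw [relaxB_some_none d a b da hga hgb, PySem.Dict.get?_insert] at hv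
          by_cases hvb : v = b
          · rw [if_pos hvb] at hv
            injection hv with hc
            subst hvb
            exact ⟨ka + 1, by push_cast; omega, hnext⟩
          · rw [if_neg hvb] at hv
            exact hd v c hv
      | some db =>
          rw [relaxB_some_some d a b da db hga hgb] at hv
          by_cases hlt : da + 1 < db
          · rw [if_pos hlt, PySem.Dict.get?_insert] at hv
            by_cases hvb : v = b
            · rw [if_pos hvb] at hv
              injection hv with hc
              subst hvb
              exact ⟨ka + 1, by push_cast; omega, hnext⟩
            · rw [if_neg hvb] at hv
              exact hd v c hv
          · rw [if_neg hlt] at hv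
            exact hd v c hv

lemma valid_roundB (edges : List (Int × Int)) (s : Int) :
    ∀ (l : List (Int × Int)), (∀ p ∈ l, p ∈ edges) →
    ∀ (d : PySem.Dict Int Int), ValidD edges s d →
    ValidD edges s (l.foldl (fun d p => relaxB (relaxB d p.1 p.2) p.2 p.1) d) := by
  intro l
  induction l with
  | nil => intro _ d hd; exact hd
  | cons p l ih =>
      intro hl d hd
      simp only [List.foldl_cons]
      apply ih (fun q hq => hl q (List.mem_cons_of_mem _ hq))
      apply valid_relaxB edges s _ p.2 p.1 (Or.inr (by simpa using hl p List.mem_cons_self))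
      exact valid_relaxB edges s d p.1 p.2 (Or.inl (by simpa using hl p List.mem_cons_self)) hd

-- completeness after r rounds
def ComplD (edges : List (Int × Int)) (s : Int) (r : Nat) (d : PySem.Dict Int Int) : Prop :=
  ∀ k : Nat, k ≤ r → ∀ v ∈ ball edges s k, ∃ c ≤ (k : Int), d.get? v = some c

lemma compl_roundB (edges : List (Int × Int)) (s : Int) (r : Nat) (d : PySem.Dict Int Int)
    (hd : ComplD edges s r d) : ComplD edges s (r + 1) (roundB edges d) := by
  intro k hk v hv
  rcases Nat.lt_or_ge r k with hkr | hkr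
  swap
  · obtain ⟨c, hc, h⟩ := hd k hkr v hv
    obtain ⟨c', hc', h'⟩ := foldl_round_mono edges d v c h
    exact ⟨c', by omega, h'⟩
  · have hkeq : k = r + 1 := by omega
    subst hkeq
    rcases (mem_expand edges (ball edges s r) v).mp hv with hvr | ⟨u, hu, he⟩
    · obtain ⟨c, hc, h⟩ := hd r le_rfl v hvr
      obtain ⟨c', hc', h'⟩ := foldl_round_mono edges d v c h
      exact ⟨c', by push_cast; omega, h'⟩
    · obtain ⟨cu, hcu, hu'⟩ := hd r le_rfl u hu
      rcases he with he | he
      · obtain ⟨cv, hcv, h⟩ := (round_sends edges (u, v) he d).1 cu hu'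
        exact ⟨cv, by push_cast at hcu ⊢; omega, h⟩
      · obtain ⟨cv, hcv, h⟩ := (round_sends edges (v, u) he d).2 cu hu'
        exact ⟨cv, by push_cast at hcu ⊢; omega, h⟩

-- iterating the rounds
lemma distsB_succ (edges : List (Int × Int)) (r : Nat) (i : Int) :
    distsB edges (r + 1) i = roundB edges (distsB edges r i) := by
  unfold distsB
  rw [List.range_succ, List.foldl_append]
  rfl

lemma distsB_valid (edges : List (Int × Int)) (i : Int) :
    ∀ r, ValidD edges i (distsB edges r i) := by
  intro r
  induction r with
  | zero =>
      intro v c hv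
      unfold distsB at hv
      simp only [List.range_zero, List.foldl_nil] at hv
      rw [PySem.Dict.get?_insert] at hv
      by_cases hvi : v = i
      · rw [if_pos hvi] at hv
        cases hv
        exact ⟨0, rfl, by simp [ball, hvi]⟩
      · rw [if_neg hvi, PySem.Dict.get?_empty] at hv
        cases hv
  | succ r ih =>
      rw [distsB_succ]
      exact valid_roundB edges i edges (fun p hp => hp) _ ih

lemma distsB_compl (edges : List (Int × Int)) (i : Int) :
    ∀ r, ComplD edges i r (distsB edges r i) := by
  intro r
  induction r with
  | zero =>
      intro k hk v hv
      have hk0 : k = 0 := by omega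
      subst hk0
      simp only [ball, Finset.mem_singleton] at hv
      subst hv
      refine ⟨0, le_rfl, ?_⟩
      unfold distsB
      simp only [List.range_zero, List.foldl_nil]
      rw [PySem.Dict.get?_insert, if_pos rfl]
  | succ r ih =>
      rw [distsB_succ]
      exact compl_roundB edges i r _ ih

lemma distsB_keys_nodup (edges : List (Int × Int)) (r : Nat) (i : Int) :
    (distsB edges r i).keys.Nodup := by
  have hrelax : ∀ (d : PySem.Dict Int Int) (a b : Int),
      d.keys.Nodup → (relaxB d a b).keys.Nodup := by
    intro d a b hd
    cases hga : d.get? a with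
    | none => rw [relaxB_none d a b hga]; exact hd
    | some da =>
        cases hgb : d.get? b with
        | none =>
            rw [relaxB_some_none d a b da hga hgb]
            exact PySem.Dict.nodup_keys_insert _ _ _ hd
        | some db =>
            rw [relaxB_some_some d a b da db hga hgb]
            split_ifs
            · exact PySem.Dict.nodup_keys_insert _ _ _ hd
            · exact hd
  have hround : ∀ (l : List (Int × Int)) (d : PySem.Dict Int Int),
      d.keys.Nodup →
      (l.foldl (fun d p => relaxB (relaxB d p.1 p.2) p.2 p.1) d).keys.Nodup := by
    intro l
    induction l with
    | nil => intro d hd; exact hd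
    | cons p l ih =>
        intro d hd
        exact ih _ (hrelax _ _ _ (hrelax _ _ _ hd))
  induction r with
  | zero =>
      unfold distsB
      simp only [List.range_zero, List.foldl_nil]
      exact PySem.Dict.nodup_keys_insert _ _ _ (PySem.Dict.nodup_keys_empty)
  | succ r ih =>
      rw [distsB_succ]
      exact hround edges _ ih

-- the final dict: get? v = some (dmin v) exactly on ball R
lemma distsB_get_char (r_list : List (List Int)) (i : Int) (v : Int) :
    (distsB (edgesB r_list) (nodesOf (edgesB r_list)).length i).get? v =
      if v ∈ ball (edgesB r_list) i (nodesOf (edgesB r_list)).length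
      then some ((dmin (edgesB r_list) i (nodesOf (edgesB r_list)).length v : Int))
      else none := by
  set edges := edgesB r_list
  set R := (nodesOf edges).length with hRdef
  have hR : (uniF edges i).card ≤ R + 1 := card_uniF_le edges i
  have hvalid := distsB_valid edges i R
  have hcompl := distsB_compl edges i R
  by_cases hv : v ∈ ball edges i R
  · rw [if_pos hv]
    obtain ⟨hmem, hle⟩ := dmin_mem edges i R hv
    obtain ⟨c, hc, h⟩ := hcompl (dmin edges i R v) hle v hmem
    obtain ⟨k, hk, hballk⟩ := hvalid v c h
    have h1 : dmin edges i R v ≤ k := dmin_le edges i R hballk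
    have h2 : c = ((dmin edges i R v : Nat) : Int) := by
      rw [hk]
      omega
    rw [h, h2]
  · rw [if_neg hv]
    cases hg : (distsB edges R i).get? v with
    | none => rfl
    | some c =>
        exfalso
        obtain ⟨k, _, hballk⟩ := hvalid v c hg
        exact hv (ball_le_R edges i hR k hballk)

lemma distsB_sum (r_list : List (List Int)) (i : Int) :
    ((distsB (edgesB r_list) (nodesOf (edgesB r_list)).length i).values).sum =
      totalSpec (edgesB r_list) i (nodesOf (edgesB r_list)).length := by
  set edges := edgesB r_list
  set R := (nodesOf edges).length with hRdef
  set D := distsB edges R i with hD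
  have hnd : D.keys.Nodup := distsB_keys_nodup edges R i
  rw [PySem.Dict.values_eq_map_keys D hnd 0]
  have hkeysfin : D.keys.toFinset = ball edges i R := by
    apply Finset.ext
    intro v
    rw [List.mem_toFinset]
    constructor
    · intro hv
      have : D.get? v ≠ none := by
        intro hnone
        rw [PySem.Dict.get?_eq_none_iff_not_mem_keys] at hnone
        exact hnone hv
      rw [distsB_get_char r_list i v] at this
      by_contra hvb
      rw [if_neg hvb] at this
      exact this rfl
    · intro hv
      have h := distsB_get_char r_list i v
      rw [if_pos hv] at h
      by_contra hvk
      rw [← PySem.Dict.get?_eq_none_iff_not_mem_keys] at hvk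
      rw [h] at hvk
      cases hvk
  have hmap : D.keys.map (fun k => D.getD k 0) =
      D.keys.map (fun v => ((dmin edges i R v : Nat) : Int)) := by
    apply List.map_congr_left
    intro v hv
    have hvb : v ∈ ball edges i R := by
      rw [← hkeysfin, List.mem_toFinset]; exact hv
    have h := distsB_get_char r_list i v
    rw [if_pos hvb] at h
    exact PySem.Dict.getD_of_get?_eq_some _ _ h
  rw [hmap]
  unfold totalSpec
  rw [← hkeysfin]
  rw [List.sum_toFinset _ hnd]

-- per-source agreement of the two programs
lemma per_source (r_list : List (List Int)) (i : Int) :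
    bfsA i (relA r_list) =
      ((distsB (edgesB r_list) (nodesOf (edgesB r_list)).length i).values).sum := by
  rw [bfsA_eq_totalSpec, distsB_sum]

lemma totalSpec_nonneg (edges : List (Int × Int)) (s : Int) (R : Nat) :
    0 ≤ totalSpec edges s R := by
  unfold totalSpec
  apply Finset.sum_nonneg
  intro v _
  positivity

-- ---------------------------------------------------------------------------
-- Stage 6: the outer minimum loops agree.
-- ---------------------------------------------------------------------------

def mstep (acc : Option (Int × Int)) (q : Int × Int) : Option (Int × Int) :=
  match acc with
  | none => some q
  | some m => if q.2 < m.2 then some q else some m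

def bstep (g : Int → Int) (b : Int × Int) (i : Int) : Int × Int :=
  if b.2 < 0 || g i < b.2 then (i, g i) else b

lemma foldl_fun_ext {α β : Type} {f h : β → α → β} (hfh : ∀ b a, f b a = h b a) :
    ∀ (l : List α) (b : β), l.foldl f b = l.foldl h b := by
  intro l
  induction l with
  | nil => intro b; rfl
  | cons a l ih =>
      intro b
      simp only [List.foldl_cons, hfh]
      exact ih _

lemma min_fold_eq (g : Int → Int) (hg : ∀ i, 0 ≤ g i) :
    ∀ (xs : List Int) (p : Int × Int), 0 ≤ p.2 →
    ((xs.map (fun i => (i, g i))).foldl mstep (some p)) =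
      some (xs.foldl (bstep g) p) := by
  intro xs
  induction xs with
  | nil => intro p _; rfl
  | cons x xs ih =>
      intro p hp
      simp only [List.map_cons, List.foldl_cons]
      have h0 : ¬ ((p.2 : Int) < 0) := by omega
      have e1 : mstep (some p) (x, g x) = if g x < p.2 then some (x, g x) else some p := rfl
      by_cases hlt : g x < p.2
      · have e2 : bstep g p x = (x, g x) := by
          unfold bstep
          simp [hlt]
        rw [e1, if_pos hlt, e2]
        exact ih (x, g x) (hg x)
      · have e2 : bstep g p x = p := by
          unfold bstep
          simp [hlt, h0]
        rw [e1, if_neg hlt, e2]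
        exact ih p hp

lemma outer_eq (g : Int → Int) (hg : ∀ i, 0 ≤ g i) (xs : List Int) :
    ((PySem.List.min? (xs.map (fun i => (i, g i))) (fun q => q.2)).getD (0, 0)).1 =
    (xs.foldl (bstep g) (0, -1)).1 := by
  cases xs with
  | nil => rfl
  | cons x t =>
      have h1 : PySem.List.min? ((x :: t).map (fun i => (i, g i))) (fun q => q.2) =
          (t.map (fun i => (i, g i))).foldl mstep (some (x, g x)) := by
        unfold PySem.List.min?
        rw [List.map_cons, List.foldl_cons]
        exact foldl_fun_ext (fun b a => by cases b <;> rfl) _ _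
      have h2 : (x :: t).foldl (bstep g) (0, -1) = t.foldl (bstep g) (x, g x) := by
        rw [List.foldl_cons]
        have : bstep g (0, -1) x = (x, g x) := by
          unfold bstep
          norm_num
        rw [this]
      rw [h1, min_fold_eq g hg t (x, g x) (hg x), h2]
      rfl

-- ===== VERDICT (by name: the statement is the Claim_ definition above) =====
theorem solution_spec : Claim_equal_solution := by
  intro user_n r_list _ _
  unfold Spec_solution solution solution_alt
  simp only []
  have hmapf : (PySem.List.pyRange 1 (user_n + 1) 1).map (fun i => (i, bfsA i (relA r_list))) =
      (PySem.List.pyRange 1 (user_n + 1) 1).map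
        (fun i => (i, (distsB (edgesB r_list) (nodesOf (edgesB r_list)).length i).values.sum)) := by
    apply List.map_congr_left
    intro i _
    rw [per_source]
  rw [hmapf]
  exact outer_eq
    (fun i => (distsB (edgesB r_list) (nodesOf (edgesB r_list)).length i).values.sum)
    (fun i => by
      show 0 ≤ (distsB (edgesB r_list) (nodesOf (edgesB r_list)).length i).values.sum
      rw [distsB_sum r_list i]
      exact totalSpec_nonneg _ _ _)
    (PySem.List.pyRange 1 (user_n + 1) 1)
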